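-- pv_equiv track=rewrite | github.com/KimChangHyeon111/coding_test_practice | 20220501_더_맵게_Lv2.py | solution
-- ===== SOURCE A (Python) =====
-- import heapq
--
-- def solution(scoville, K):
--     heapq.heapify(scoville)
--     n_iters = 0
--     min1 = heapq.heappop(scoville)
--     try:
--         while min1 < K:
--             min2 = heapq.heappop(scoville)
--             heapq.heappush(scoville, min1+2*min2)
--             n_iters += 1
--             min1 = heapq.heappop(scoville)
--     except:
--         n_iters = -1
--     return n_iters
-- ===== SOURCE B (Python) =====
-- def solution(scoville, K):
--     s = list(scoville)
--     count = 0
--     while True: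
--         m1 = min(s)
--         if m1 >= K:
--             return count
--         if len(s) == 1:
--             return -1
--         s.remove(m1)
--         m2 = min(s)
--         s.remove(m2)
--         s.append(m1 + 2 * m2)
--         count += 1
-- ===== Notes on version B (the rewrite author's own statement) =====
-- stated objective: simpler
-- what changed: B drops heapq entirely and runs a plain early-return loop on an ordinary list, finding and removing the two smallest elements by min()/remove() scans each round; A's try/except -1 path becomes an explicit length check, and B does not mutate its argument.
import Mathlib
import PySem

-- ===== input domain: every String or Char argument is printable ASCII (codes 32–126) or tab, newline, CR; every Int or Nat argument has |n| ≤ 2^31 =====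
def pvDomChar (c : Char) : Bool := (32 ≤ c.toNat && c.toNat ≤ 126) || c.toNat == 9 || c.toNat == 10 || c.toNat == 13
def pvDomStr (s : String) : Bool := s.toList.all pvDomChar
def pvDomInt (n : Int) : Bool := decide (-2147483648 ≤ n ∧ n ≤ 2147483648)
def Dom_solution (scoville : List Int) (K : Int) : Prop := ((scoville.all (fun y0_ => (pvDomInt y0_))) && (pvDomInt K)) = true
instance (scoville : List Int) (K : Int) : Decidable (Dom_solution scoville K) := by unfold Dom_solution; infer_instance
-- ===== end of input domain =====

-- B replaces A's heapq machinery by plain min/remove scans on an ordinary list with an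
-- early-return loop (objective: simpler; not faster). Equivalence is about the RETURN
-- value only: Python A heapifies/consumes its argument in place, B leaves it untouched.
-- heapq.heapify/heappop/heappush are ported by their library contract (heappop removes
-- and returns the smallest element; exact for Int elements, where equal elements are
-- indistinguishable and the heap's internal layout is unobservable in the return value).

-- ===== PORT A =====
-- heappop: remove and return the smallest element (none = IndexError on empty heap)
def pyHeappop? (h : List Int) : Option (Int × List Int) :=
  match PySem.List.min? h (fun x => x) with
  | none => none
  | some m => some (m, ((PySem.List.remove? h m).getD h))

theorem pyHeappop?_length {h : List Int} {m : Int} {t : List Int}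
    (hp : pyHeappop? h = some (m, t)) : t.length + 1 = h.length := by
  unfold pyHeappop? at hp
  split at hp
  · exact absurd hp (by simp)
  · next m' hm =>
    have hmem := PySem.List.min?_mem hm
    rw [PySem.List.remove?_eq_some_erase h m' hmem] at hp
    simp only [Option.getD_some, Option.some.injEq, Prod.mk.injEq] at hp
    obtain ⟨rfl, rfl⟩ := hp
    simpa [List.length_erase_of_mem hmem] using Nat.succ_pred_eq_of_pos (List.length_pos_of_mem hmem)

-- the while loop of A; min1 is already popped; 'except:' → -1
def solutionLoop (heap : List Int) (min1 : Int) (K : Int) (n : Int) : Int :=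
  if min1 < K then
    match h2 : pyHeappop? heap with
    | none => -1                                   -- heappop on empty heap → except: n_iters = -1
    | some (min2, h1) =>
      match h3 : pyHeappop? (h1 ++ [min1 + 2 * min2]) with   -- heappush then heappop
      | none => -1                                 -- unreachable: the pushed heap is nonempty
      | some (min1', h4) => solutionLoop h4 min1' K (n + 1)
  else n
termination_by heap.length
decreasing_by
  have l1 := pyHeappop?_length h2
  have l2 := pyHeappop?_length h3
  simp at l2; omega

def solution (scoville : List Int) (K : Int) : Int :=
  match pyHeappop? scoville with
  | none => 0          -- Python raises IndexError here (empty input); excluded by Pre_solution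
  | some (min1, heap) => solutionLoop heap min1 K 0

-- ===== PORT B =====
def solutionAltLoop (s : List Int) (K : Int) (count : Int) : Int :=
  match hm : PySem.List.min? s (fun x => x) with
  | none => 0          -- Python's min([]) raises; unreachable: s stays nonempty (empty input excluded by Pre_solution)
  | some m1 =>
    if m1 ≥ K then count
    else if s.length = 1 then -1
    else
      match hm2 : PySem.List.min? ((PySem.List.remove? s m1).getD s) (fun x => x) with
      | none => -1     -- unreachable: the list has ≥ 2 elements here
      | some m2 =>
        solutionAltLoop
          (((PySem.List.remove? ((PySem.List.remove? s m1).getD s) m2).getD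
              ((PySem.List.remove? s m1).getD s)) ++ [m1 + 2 * m2]) K (count + 1)
termination_by s.length
decreasing_by
  have hmem1 := PySem.List.min?_mem hm
  have hmem2 := PySem.List.min?_mem hm2
  rw [PySem.List.remove?_eq_some_erase s m1 hmem1] at hmem2 ⊢
  simp only [Option.getD_some] at hmem2 ⊢
  rw [PySem.List.remove?_eq_some_erase _ m2 hmem2]
  have p1 := List.length_pos_of_mem hmem1
  simp [List.length_erase_of_mem, hmem1, hmem2]
  omega

def solution_alt (scoville : List Int) (K : Int) : Int :=
  solutionAltLoop scoville K 0

-- ===== PRECONDITION & SPEC =====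
-- Pre_ excludes only the empty list, on which Python A raises an uncaught IndexError
-- (the very first heappop) and B's min([]) raises ValueError.
def Pre_solution (scoville : List Int) (K : Int) : Prop := scoville ≠ []
instance (scoville : List Int) (K : Int) : Decidable (Pre_solution scoville K) := by unfold Pre_solution; infer_instance
def pvWitness_solution : List Int × Int := ([1, 2, 3, 9, 10, 12], 7)

def Spec_solution (scoville : List Int) (K : Int) (out : Int) : Prop := out = solution_alt scoville K
instance (scoville : List Int) (K : Int) (out : Int) : Decidable (Spec_solution scoville K out) := by unfold Spec_solution; infer_instance

-- ===== CLAIM (what is proved, stated in full; the proofs are below) =====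
def Claim_equal_solution : Prop := ∀ (scoville : List Int) (K : Int), Dom_solution scoville K → Pre_solution scoville K → Spec_solution scoville K (solution scoville K)

-- ===== LEMMAS AND PROOFS =====

-- inversion for pyHeappop?
theorem pyHeappop?_none (h : List Int) (hp : pyHeappop? h = none) : h = [] := by
  unfold pyHeappop? at hp
  cases hm : PySem.List.min? h (fun x => x) with
  | none => exact (PySem.List.min?_eq_none_iff h (fun x => x)).mp hm
  | some m => rw [hm] at hp; exact absurd hp (by simp)

theorem pyHeappop?_inv {h : List Int} {m : Int} {t : List Int}
    (hp : pyHeappop? h = some (m, t)) :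
    PySem.List.min? h (fun x => x) = some m ∧ t = h.erase m := by
  unfold pyHeappop? at hp
  cases hm : PySem.List.min? h (fun x => x) with
  | none => rw [hm] at hp; simp at hp
  | some m' =>
    rw [hm, show (match some m' with
        | none => none
        | some m => some (m, (PySem.List.remove? h m).getD h)) =
        some (m', (PySem.List.remove? h m').getD h) from rfl,
      PySem.List.remove?_eq_some_erase h m' (PySem.List.min?_mem hm)] at hp
    simp only [Option.getD_some, Option.some.injEq, Prod.mk.injEq] at hp
    obtain ⟨rfl, rfl⟩ := hp
    exact ⟨rfl, rfl⟩

-- Core lemma: A's loop, entered with the minimum m already popped out of s, computes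
-- the same count as B's loop entered with s intact.
theorem loops_agree : ∀ (N : Nat) (s : List Int), s.length ≤ N → ∀ (m K n : Int),
    PySem.List.min? s (fun x => x) = some m →
    solutionLoop (s.erase m) m K n = solutionAltLoop s K n := by
  intro N
  induction N with
  | zero =>
    intro s hs m K n hm
    have := PySem.List.min?_mem hm
    have := List.length_pos_of_mem this
    omega
  | succ N ih =>
    intro s hs m K n hm
    have hmem := PySem.List.min?_mem hm
    have hlen := List.length_pos_of_mem hmem
    have hlerase : (s.erase m).length + 1 = s.length := by
      rw [List.length_erase_of_mem hmem]; omega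
    have hrem : (PySem.List.remove? s m).getD s = s.erase m := by
      rw [PySem.List.remove?_eq_some_erase s m hmem]; rfl
    rw [solutionLoop, solutionAltLoop]
    by_cases hK : m < K
    · rw [if_pos hK]
      split
      · next hpop =>
        -- A: heappop on the emptied heap raised → -1; B: single element below K → -1
        have he : s.erase m = [] := pyHeappop?_none _ hpop
        have hs1 : s.length = 1 := by
          have : (s.erase m).length = 0 := by rw [he]; rfl
          omega
        split
        · next hn => rw [hm] at hn; exact absurd hn (by simp)
        · next m1 hm1 =>
          rw [hm] at hm1; injection hm1 with hm1; subst hm1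
          rw [if_neg (by omega), if_pos hs1]
      · next m2 h1 hpop =>
        obtain ⟨hmin2, rfl⟩ := pyHeappop?_inv hpop
        have hmem2 := PySem.List.min?_mem hmin2
        have hlen2 := List.length_pos_of_mem hmem2
        have hlen2' : ((s.erase m).erase m2).length + 1 = (s.erase m).length := by
          rw [List.length_erase_of_mem hmem2]; omega
        split
        · next hpop3 =>
          have : ((s.erase m).erase m2 ++ [m + 2 * m2]) = [] := pyHeappop?_none _ hpop3
          simp at this
        · next m1' h4 hpop3 =>
          obtain ⟨hmin', rfl⟩ := pyHeappop?_inv hpop3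
          split
          · next hn => rw [hm] at hn; exact absurd hn (by simp)
          · next m1 hm1 =>
            rw [hm] at hm1; injection hm1 with hm1; subst hm1
            rw [if_neg (by omega), if_neg (by omega), hrem]
            split
            · next hn2 => rw [hmin2] at hn2; exact absurd hn2 (by simp)
            · next m2' hm2' =>
              rw [hmin2] at hm2'; injection hm2' with hm2'; subst hm2'
              rw [PySem.List.remove?_eq_some_erase _ m2 hmem2]
              simp only [Option.getD_some]
              apply ih
              · simp only [List.length_append, List.length_cons, List.length_nil]
                omega
              · exact hmin'
    · rw [if_neg hK]
      split
      · next hn => rw [hm] at hn; exact absurd hn (by simp)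
      · next m1 hm1 =>
        rw [hm] at hm1; injection hm1 with hm1; subst hm1
        rw [if_pos (by omega)]

-- ===== VERDICT (by name: the statement is the Claim_ definition above) =====
theorem solution_spec : Claim_equal_solution := by
  intro scoville K _ hpre
  unfold Spec_solution solution solution_alt
  obtain ⟨m, hm⟩ : ∃ m, PySem.List.min? scoville (fun x => x) = some m := by
    cases h : PySem.List.min? scoville (fun x => x) with
    | none => exact absurd ((PySem.List.min?_eq_none_iff _ _).mp h) hpre
    | some m => exact ⟨m, rfl⟩
  have hmem := PySem.List.min?_mem hm
  unfold pyHeappop?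
  rw [hm]
  simp only [PySem.List.remove?_eq_some_erase scoville m hmem, Option.getD_some]
  exact loops_agree scoville.length scoville le_rfl m K 0 hm
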